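-- pv_equiv track=rewrite | github.com/cormackikkert/Contests | CodeForces/Round 594/D2.py | calc2
-- ===== SOURCE A (Python) =====
-- def calc2(string):
--     N = len(string)
--     l = 0
--     s = 0
--     for char in string:
--         if char == "(":
--             s += 1
--         else:
--             s -= 1
--         l = min(l, s)
--
--     if s != 0: return 0
--
--     t = 0
--
--     for i in range(N):
--         c = string[i]
--         if c == "(":
--             s += 1
--             if s - l <= 1:
--                 t += 1
--         else:
--             s -= 1
--     return t
-- ===== SOURCE B (Python) =====
-- def calc2(string):
--     s = 0
--     m = 0
--     t = 0
--     for c in string: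
--         if s < m:
--             m = s
--             t = 0
--         if s == m and c == "(":
--             t += 1
--         s = s + 1 if c == "(" else s - 1
--     return 0 if s != 0 else t
-- ===== Notes on version B (the rewrite author's own statement) =====
-- stated objective: faster
-- what changed: Replaces A's two passes (first compute the global minimum prefix balance, then re-scan counting open-bracket positions at it) by a single forward pass that maintains the running balance, a running minimum, and a count that resets whenever a strictly lower minimum is found.
import Mathlib
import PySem

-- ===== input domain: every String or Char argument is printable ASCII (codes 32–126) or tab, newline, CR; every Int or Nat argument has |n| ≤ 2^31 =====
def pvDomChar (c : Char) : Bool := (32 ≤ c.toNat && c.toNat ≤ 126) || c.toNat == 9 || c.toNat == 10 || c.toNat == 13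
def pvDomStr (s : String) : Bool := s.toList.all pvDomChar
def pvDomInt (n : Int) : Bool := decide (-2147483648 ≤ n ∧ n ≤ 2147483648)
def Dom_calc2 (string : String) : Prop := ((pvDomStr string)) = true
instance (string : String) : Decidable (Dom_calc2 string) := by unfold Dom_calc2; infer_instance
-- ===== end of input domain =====

-- B replaces A's two passes by one pass with a running minimum and a resetting count (measured faster by a constant factor).

-- ===== PORT A =====
-- first loop body: update balance s, then l = min(l, s)
def fA (ls : Int × Int) (c : Char) : Int × Int :=
  let s := if c = '(' then ls.2 + 1 else ls.2 - 1
  (min ls.1 s, s)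

-- second loop body (l fixed): on '(' bump s and count if s - l ≤ 1, else decrement s
def gA (l : Int) (st : Int × Int) (c : Char) : Int × Int :=
  if c = '(' then
    let s := st.1 + 1
    (s, if s - l ≤ 1 then st.2 + 1 else st.2)
  else (st.1 - 1, st.2)

def calc2 (string : String) : Int :=
  let cs := string.toList
  let p := cs.foldl fA (0, 0)
  let l := p.1
  let s := p.2
  if s ≠ 0 then 0
  else (cs.foldl (gA l) (s, 0)).2

-- ===== PORT B =====
-- single-pass body: state (s, m, t); reset on a strictly lower minimum, count '(' at the minimum, update balance
def hB (st : Int × Int × Int) (c : Char) : Int × Int × Int :=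
  let s := st.1
  let m1 := if s < st.2.1 then s else st.2.1
  let t1 := if s < st.2.1 then 0 else st.2.2
  let t2 := if s = m1 ∧ c = '(' then t1 + 1 else t1
  (if c = '(' then s + 1 else s - 1, m1, t2)

def calc2_alt (string : String) : Int :=
  let r := string.toList.foldl hB (0, 0, 0)
  if r.1 ≠ 0 then 0 else r.2.2

-- ===== PRECONDITION & SPEC =====
def Spec_calc2 (string : String) (out : Int) : Prop := out = calc2_alt string
instance (string : String) (out : Int) : Decidable (Spec_calc2 string out) := by unfold Spec_calc2; infer_instance

-- ===== CLAIM (what is proved, stated in full; the proofs are below) =====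
def Claim_equal_calc2 : Prop := ∀ (string : String), Dom_calc2 string → Spec_calc2 string (calc2 string)

-- ===== LEMMAS AND PROOFS =====

-- one step of the balance
def pvStep (s : Int) (c : Char) : Int := if c = '(' then s + 1 else s - 1

-- final balance starting from s
def pvBal (s : Int) : List Char → Int
  | [] => s
  | c :: cs => pvBal (pvStep s c) cs

-- minimum over all prefix balances (including the initial s and the final balance)
def pvMn (s : Int) : List Char → Int
  | [] => s
  | c :: cs => min s (pvMn (pvStep s c) cs)

-- foldl of min over m and the before-char balances
def pvPreMin (m s : Int) : List Char → Int
  | [] => m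
  | c :: cs => pvPreMin (min m s) (pvStep s c) cs

-- number of '(' positions whose before-char balance equals l
def pvCnt (l s : Int) : List Char → Int
  | [] => 0
  | c :: cs => (if s = l ∧ c = '(' then 1 else 0) + pvCnt l (pvStep s c) cs

-- A's second-pass count: '(' positions with after-char balance - l ≤ 1
def pvCntA (l s : Int) : List Char → Int
  | [] => 0
  | c :: cs =>
    if c = '(' then (if s + 1 - l ≤ 1 then 1 else 0) + pvCntA l (s + 1) cs
    else pvCntA l (s - 1) cs

theorem pvMn_le (s : Int) (cs : List Char) : pvMn s cs ≤ s := by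
  cases cs with
  | nil => simp [pvMn]
  | cons c cs => simp [pvMn]

theorem pvPreMin_le (m s : Int) (cs : List Char) : pvPreMin m s cs ≤ m := by
  induction cs generalizing m s with
  | nil => simp [pvPreMin]
  | cons c cs ih =>
    calc pvPreMin m s (c :: cs) = pvPreMin (min m s) (pvStep s c) cs := rfl
      _ ≤ min m s := ih _ _
      _ ≤ m := min_le_left _ _

theorem pass1 (cs : List Char) : ∀ l s : Int, l ≤ s →
    cs.foldl fA (l, s) = (min l (pvMn s cs), pvBal s cs) := by
  induction cs with
  | nil => intro l s h; simp [pvMn, pvBal, min_eq_left h]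
  | cons c cs ih =>
    intro l s h
    have hs : List.foldl fA (l, s) (c :: cs)
        = List.foldl fA (min l (pvStep s c), pvStep s c) cs := by
      simp [fA, pvStep]
    rw [hs, ih _ _ (min_le_right _ _)]
    have h1 : pvMn (pvStep s c) cs ≤ pvStep s c := pvMn_le _ _
    have : min (min l (pvStep s c)) (pvMn (pvStep s c) cs)
        = min l (pvMn s (c :: cs)) := by
      simp only [pvMn]
      omega
    rw [this]
    rfl

theorem pass2 (l : Int) (cs : List Char) : ∀ s t : Int,
    cs.foldl (gA l) (s, t) = (pvBal s cs, t + pvCntA l s cs) := by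
  induction cs with
  | nil => intro s t; simp [pvBal, pvCntA]
  | cons c cs ih =>
    intro s t
    by_cases hc : c = '('
    · rw [show List.foldl (gA l) (s, t) (c :: cs)
            = List.foldl (gA l) (s + 1, if s + 1 - l ≤ 1 then t + 1 else t) cs from by
          simp [gA, hc], ih]
      rw [show pvBal s (c :: cs) = pvBal (s + 1) cs from by simp [pvBal, pvStep, hc]]
      rw [show pvCntA l s (c :: cs)
            = (if s + 1 - l ≤ 1 then 1 else 0) + pvCntA l (s + 1) cs from by
          simp [pvCntA, hc]]
      refine Prod.ext rfl ?_
      split_ifs <;> ring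
    · rw [show List.foldl (gA l) (s, t) (c :: cs) = List.foldl (gA l) (s - 1, t) cs from by
          simp [gA, hc], ih]
      rw [show pvBal s (c :: cs) = pvBal (s - 1) cs from by simp [pvBal, pvStep, hc]]
      rw [show pvCntA l s (c :: cs) = pvCntA l (s - 1) cs from by simp [pvCntA, hc]]

theorem bmain (cs : List Char) : ∀ s m t : Int,
    cs.foldl hB (s, m, t)
      = (pvBal s cs, pvPreMin m s cs,
         if pvPreMin m s cs = m then t + pvCnt m s cs
         else pvCnt (pvPreMin m s cs) s cs) := by
  induction cs with
  | nil => intro s m t; simp [pvBal, pvPreMin, pvCnt]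
  | cons c cs ih =>
    intro s m t
    have hm1 : (if s < m then s else m) = min m s := by omega
    have hs : List.foldl hB (s, m, t) (c :: cs)
        = List.foldl hB (pvStep s c, min m s,
            if s = min m s ∧ c = '(' then (if s < m then 0 else t) + 1
            else (if s < m then 0 else t)) cs := by
      simp only [List.foldl_cons, hB, hm1, pvStep]
    rw [hs, ih]
    have hpre : pvPreMin m s (c :: cs) = pvPreMin (min m s) (pvStep s c) cs := rfl
    have hcnt : ∀ l : Int, pvCnt l s (c :: cs)
        = (if s = l ∧ c = '(' then 1 else 0) + pvCnt l (pvStep s c) cs := fun _ => rfl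
    have hbal : pvBal s (c :: cs) = pvBal (pvStep s c) cs := rfl
    rw [hpre, hbal, hcnt m, hcnt (pvPreMin (min m s) (pvStep s c) cs)]
    refine Prod.ext rfl (Prod.ext rfl ?_)
    have hle : pvPreMin (min m s) (pvStep s c) cs ≤ min m s := pvPreMin_le _ _ _
    by_cases h2 : s < m
    · have hms : min m s = s := by omega
      rw [hms] at hle ⊢
      have hne : pvPreMin s (pvStep s c) cs ≠ m := by omega
      simp only [if_pos h2, if_neg hne]
      by_cases hP : pvPreMin s (pvStep s c) cs = s
      · simp only [hP]
        split_ifs <;> omega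
      · have hsP : ¬ (s = pvPreMin s (pvStep s c) cs ∧ c = '(') := by
          intro h; exact hP h.1.symm
        simp [hP, hsP]
    · have hms : min m s = m := by omega
      rw [hms] at hle ⊢
      simp only [if_neg h2]
      by_cases hP : pvPreMin m (pvStep s c) cs = m
      · simp only [hP]
        split_ifs <;> omega
      · have hsP : ¬ (s = pvPreMin m (pvStep s c) cs ∧ c = '(') := by
          intro h; omega
        simp [hP, hsP]

theorem premin_mn (cs : List Char) : ∀ s m : Int,
    min m (pvMn s cs) = min (pvPreMin m s cs) (pvBal s cs) := by
  induction cs with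
  | nil => intro s m; simp [pvMn, pvPreMin, pvBal]
  | cons c cs ih =>
    intro s m
    have : min m (pvMn s (c :: cs)) = min (min m s) (pvMn (pvStep s c) cs) := by
      simp only [pvMn]; omega
    rw [this, ih]
    rfl

theorem cntA_eq_cnt (cs : List Char) : ∀ l s : Int, l ≤ pvMn s cs →
    pvCntA l s cs = pvCnt l s cs := by
  induction cs with
  | nil => intro l s _; rfl
  | cons c cs ih =>
    intro l s h
    have hmn : pvMn s (c :: cs) = min s (pvMn (pvStep s c) cs) := rfl
    have hls : l ≤ s := by rw [hmn] at h; omega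
    have hrec : l ≤ pvMn (pvStep s c) cs := by rw [hmn] at h; omega
    by_cases hc : c = '('
    · have hstep : pvStep s c = s + 1 := by simp [pvStep, hc]
      rw [hstep] at hrec
      rw [show pvCntA l s (c :: cs)
            = (if s + 1 - l ≤ 1 then 1 else 0) + pvCntA l (s + 1) cs from by
          simp [pvCntA, hc]]
      rw [show pvCnt l s (c :: cs)
            = (if s = l ∧ c = '(' then 1 else 0) + pvCnt l (s + 1) cs from by
          simp [pvCnt, pvStep, hc]]
      rw [ih _ _ hrec]
      have hcond : (s + 1 - l ≤ 1) ↔ (s = l ∧ c = '(') := by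
        constructor
        · intro h'; exact ⟨by omega, hc⟩
        · intro h'; omega
      simp only [hcond]
    · have hstep : pvStep s c = s - 1 := by simp [pvStep, hc]
      rw [hstep] at hrec
      rw [show pvCntA l s (c :: cs) = pvCntA l (s - 1) cs from by simp [pvCntA, hc]]
      rw [show pvCnt l s (c :: cs) = pvCnt l (s - 1) cs from by
          simp [pvCnt, pvStep, hc]]
      exact ih _ _ hrec

-- ===== VERDICT (by name: the statement is the Claim_ definition above) =====
theorem calc2_spec : Claim_equal_calc2 := by
  intro string _
  unfold Spec_calc2 calc2 calc2_alt
  set cs := string.toList with hcs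
  have h1 := pass1 cs 0 0 le_rfl
  have h3 := bmain cs 0 0 0
  by_cases hb : pvBal 0 cs = 0
  · have hmle : pvMn 0 cs ≤ 0 := pvMn_le 0 cs
    have hple : pvPreMin 0 0 cs ≤ 0 := pvPreMin_le 0 0 cs
    have hR := premin_mn cs 0 0
    rw [hb] at hR
    have hL : min 0 (pvMn 0 cs) = pvPreMin 0 0 cs := by omega
    have h2 := pass2 (min 0 (pvMn 0 cs)) cs 0 0
    rw [hL] at h2
    have hcnt : pvCntA (pvPreMin 0 0 cs) 0 cs = pvCnt (pvPreMin 0 0 cs) 0 cs :=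
      cntA_eq_cnt cs _ 0 (by omega)
    simp only [h1, h3, hL, h2, hcnt, hb]
    by_cases hM : pvPreMin 0 0 cs = 0 <;> simp [hM]
  · simp only [h1, h3]
    simp [hb]
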